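-- pv_equiv track=rewrite | github.com/peptiderodriguez/xldvp_seg | scripts/assign_tissue_zones.py | _should_exclude_key
-- ===== SOURCE A (Python) =====
-- def _should_exclude_key(key, exclude_channels):
--     """Check if a feature key should be excluded based on channel indices.
--
--     Matches:
--       - ch{idx}_*  (e.g. ch3_mean, ch3_std, ch3_p99)
--       - *_ch{idx}_* cross-channel keys (e.g. ch0_ch3_ratio, ch0_ch3_diff)
--       - ch{idx} in ratio/diff keys where it appears as either operand
--     """
--     if not exclude_channels:
--         return False
--     for idx in exclude_channels:
--         tag = f'ch{idx}'
--         # Matches ch{idx}_ at start (per-channel features)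
--         if key.startswith(tag + '_'):
--             return True
--         # Matches _ch{idx}_ in middle (cross-channel ratios/diffs like ch0_ch3_ratio)
--         if f'_{tag}_' in key:
--             return True
--         # Matches _ch{idx} at end (shouldn't normally happen but be safe)
--         if key.endswith(f'_{tag}'):
--             return True
--     return False
-- ===== SOURCE B (Python) =====
-- def _should_exclude_key(key, exclude_channels):
--     tokens = key.split('_')
--     if len(tokens) < 2:
--         return False
--     toks = set(tokens)
--     return any(f'ch{idx}' in toks for idx in exclude_channels)
-- ===== Notes on version B (the rewrite author's own statement) =====
-- stated objective: simpler
-- what changed: B splits the key on '_' once and tests set membership of each 'ch{idx}' token, instead of A's per-channel triple substring scan (startswith/in/endswith) over the key.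
import Mathlib
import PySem

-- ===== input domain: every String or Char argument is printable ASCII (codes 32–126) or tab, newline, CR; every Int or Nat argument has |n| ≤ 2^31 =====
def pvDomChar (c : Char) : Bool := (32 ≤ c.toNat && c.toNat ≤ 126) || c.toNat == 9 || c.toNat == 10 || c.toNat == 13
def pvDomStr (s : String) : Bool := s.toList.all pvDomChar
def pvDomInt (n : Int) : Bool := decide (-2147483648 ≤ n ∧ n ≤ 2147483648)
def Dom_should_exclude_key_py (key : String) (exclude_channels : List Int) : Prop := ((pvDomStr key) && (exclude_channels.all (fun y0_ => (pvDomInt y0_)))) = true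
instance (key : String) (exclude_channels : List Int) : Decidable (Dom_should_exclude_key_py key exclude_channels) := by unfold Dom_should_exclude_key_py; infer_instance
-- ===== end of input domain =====

-- B splits the key once on '_' and tests token-set membership of each 'ch{idx}' tag,
-- instead of A's per-channel triple substring scan; proved to return the same Bool.


-- ===== PORT A =====
def should_exclude_key_py (key : String) (exclude_channels : List Int) : Bool :=
  if exclude_channels.isEmpty then false
  else
    exclude_channels.any fun idx =>
      let tag : List Char := ['c', 'h'] ++ PySem.Int.toChars idx
      if PySem.Chars.startswith key.toList (tag ++ ['_']) then true
      else if PySem.Chars.isIn ('_' :: (tag ++ ['_'])) key.toList then true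
      else if PySem.Chars.endswith key.toList ('_' :: tag) then true
      else false

-- ===== PORT B =====
def should_exclude_key_py_alt (key : String) (exclude_channels : List Int) : Bool :=
  let tokens := PySem.Chars.splitOn key.toList ['_']
  if tokens.length < 2 then false
  else
    let toks := PySem.Set.ofList tokens
    exclude_channels.any fun idx => toks.contains (['c', 'h'] ++ PySem.Int.toChars idx)

-- ===== PRECONDITION & SPEC =====
def Spec_should_exclude_key_py (key : String) (exclude_channels : List Int) (out : Bool) : Prop := out = should_exclude_key_py_alt key exclude_channels
instance (key : String) (exclude_channels : List Int) (out : Bool) : Decidable (Spec_should_exclude_key_py key exclude_channels out) := by unfold Spec_should_exclude_key_py; infer_instance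

-- ===== CLAIM (what is proved, stated in full; the proofs are below) =====
def Claim_equal_should_exclude_key_py : Prop := ∀ (key : String) (exclude_channels : List Int), Dom_should_exclude_key_py key exclude_channels → Spec_should_exclude_key_py key exclude_channels (should_exclude_key_py key exclude_channels)

-- ===== LEMMAS AND PROOFS =====

theorem pv_underscore_not_mem_tag (idx : Int) : '_' ∉ ('c' :: 'h' :: PySem.Int.toChars idx) := by
  intro h
  simp only [List.mem_cons] at h
  rcases h with h | h | h
  · exact absurd h (by decide)
  · exact absurd h (by decide)
  · unfold PySem.Int.toChars at h
    split at h
    · rcases List.mem_cons.1 h with h | h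
      · exact absurd h (by decide)
      · have := Nat.isDigit_of_mem_toDigits (by norm_num) (by norm_num) h
        simp [Char.isDigit] at this
    · have := Nat.isDigit_of_mem_toDigits (by norm_num) (by norm_num) h
      simp [Char.isDigit] at this
theorem pv_eqE {xs : List Char} : ∀ {ys u v : List Char}, '_' ∉ xs → '_' ∉ ys →
    xs ++ '_' :: u = ys ++ '_' :: v → xs = ys ∧ u = v := by
  induction xs with
  | nil =>
    intro ys u v _ hy h
    cases ys with
    | nil => simpa using h
    | cons y ys' =>
      simp only [List.nil_append, List.cons_append, List.cons.injEq] at h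
      exact absurd (h.1 ▸ List.mem_cons_self) hy
  | cons x xs' ih =>
    intro ys u v hx hy h
    cases ys with
    | nil =>
      simp only [List.cons_append, List.nil_append, List.cons.injEq] at h
      exact absurd (h.1.symm ▸ List.mem_cons_self) hx
    | cons y ys' =>
      simp only [List.cons_append, List.cons.injEq] at h
      obtain ⟨h1, h2⟩ := h
      have := ih (fun m => hx (List.mem_cons_of_mem _ m)) (fun m => hy (List.mem_cons_of_mem _ m)) h2
      exact ⟨by simp [h1, this.1], this.2⟩

theorem pv_firstSplit {k : List Char} (h : '_' ∈ k) :
    ∃ a r, k = a ++ '_' :: r ∧ '_' ∉ a := by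
  induction k with
  | nil => cases h
  | cons c k' ih =>
    by_cases hc : c = '_'
    · exact ⟨[], k', by simp [hc], by simp⟩
    · have h' : '_' ∈ k' := by
        rcases List.mem_cons.1 h with h | h
        · exact absurd h.symm hc
        · exact h
      rcases ih h' with ⟨a, r, rfl, ha⟩
      refine ⟨c :: a, r, by simp, ?_⟩
      intro hm
      rcases List.mem_cons.1 hm with hm | hm
      · exact hc hm.symm
      · exact ha hm

theorem pv_prefix_iff {a r tag : List Char} (ha : '_' ∉ a) (ht : '_' ∉ tag) :
    tag ++ ['_'] <+: a ++ '_' :: r ↔ tag = a := by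
  constructor
  · rintro ⟨w, hw⟩
    have : tag ++ '_' :: w = a ++ '_' :: r := by simpa using hw
    exact (pv_eqE ht ha this).1
  · rintro rfl
    exact ⟨r, by simp⟩

theorem pv_suffix_shift {a r t : List Char} (ha : '_' ∉ a) :
    ('_' :: t) <:+ (a ++ '_' :: r) ↔ ('_' :: t) <:+ ('_' :: r) := by
  constructor
  · rintro ⟨x, hx⟩
    by_cases hmx : '_' ∈ x
    · rcases pv_firstSplit hmx with ⟨x1, x2, rfl, hx1⟩
      have : x1 ++ '_' :: (x2 ++ '_' :: t) = a ++ '_' :: r := by simpa using hx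
      rcases pv_eqE hx1 ha this with ⟨rfl, hr⟩
      exact ⟨'_' :: x2, by simp [hr]⟩
    · have : x ++ '_' :: t = a ++ '_' :: r := by simpa using hx
      rcases pv_eqE hmx ha this with ⟨rfl, rfl⟩
      exact List.suffix_refl _
  · intro h
    exact h.trans ⟨a, rfl⟩

theorem pv_infix_shift {a r t : List Char} (ha : '_' ∉ a) :
    ('_' :: t) <:+: (a ++ '_' :: r) ↔ ('_' :: t) <:+: ('_' :: r) := by
  constructor
  · rintro ⟨x, y, hxy⟩
    by_cases hmx : '_' ∈ x
    · rcases pv_firstSplit hmx with ⟨x1, x2, rfl, hx1⟩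
      have : x1 ++ '_' :: (x2 ++ ('_' :: t) ++ y) = a ++ '_' :: r := by rw [← hxy]; simp
      rcases pv_eqE hx1 ha this with ⟨rfl, hr⟩
      exact ⟨'_' :: x2, y, by simp [← hr]⟩
    · have : x ++ '_' :: (t ++ y) = a ++ '_' :: r := by rw [← hxy]; simp
      rcases pv_eqE hmx ha this with ⟨rfl, hr⟩
      exact ⟨[], y, by simp [← hr]⟩
  · intro h
    exact h.trans (List.IsSuffix.isInfix ⟨a, rfl⟩)

theorem pv_ML2 (k tag : List Char) (ht : '_' ∉ tag) :
    (k = tag ∨ tag ++ ['_'] <+: k ∨ ('_' :: (tag ++ ['_'])) <:+: k ∨ ('_' :: tag) <:+ k)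
      ↔ tag ∈ List.splitOnP (· == '_') k := by
  induction hn : k.length using Nat.strong_induction_on generalizing k with
  | _ n ih =>
  by_cases hk : '_' ∈ k
  · rcases pv_firstSplit hk with ⟨a, r, rfl, ha⟩
    rw [List.splitOnP_first (· == '_') a
      (fun x hx => by simp only [beq_iff_eq]; rintro rfl; exact ha hx) '_' (by simp) r]
    have hne : ¬(a ++ '_' :: r = tag) := fun e => ht (e ▸ (by simp : '_' ∈ a ++ '_' :: r))
    have hlen : r.length < n := by rw [← hn]; simp; omega
    have hIH := ih r.length hlen r rfl
    rw [pv_prefix_iff ha ht, pv_infix_shift ha, pv_suffix_shift ha, List.infix_cons_iff,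
      List.suffix_cons_iff, List.cons_prefix_cons, List.mem_cons]
    rw [← hIH]
    simp only [List.cons.injEq, true_and]
    constructor
    · rintro (h | h | (h | h) | (h | h))
      · exact absurd h hne
      · exact Or.inl h
      · exact Or.inr (Or.inr (Or.inl h))
      · exact Or.inr (Or.inr (Or.inr (Or.inl h)))
      · exact Or.inr (Or.inl h.symm)
      · exact Or.inr (Or.inr (Or.inr (Or.inr h)))
    · rintro (h | (h | h | h | h))
      · exact Or.inr (Or.inl h)
      · exact Or.inr (Or.inr (Or.inr (Or.inl h.symm)))
      · exact Or.inr (Or.inr (Or.inl (Or.inl h)))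
      · exact Or.inr (Or.inr (Or.inl (Or.inr h)))
      · exact Or.inr (Or.inr (Or.inr (Or.inr h)))
  · rw [List.splitOnP_eq_single _ _ (fun x hx => by simp only [beq_iff_eq]; rintro rfl; exact hk hx)]
    simp only [List.mem_singleton]
    constructor
    · rintro (rfl | h | h | h)
      · rfl
      · exact absurd (h.subset (by simp)) hk
      · exact absurd (h.subset (by simp)) hk
      · exact absurd (h.subset (by simp)) hk
    · intro h; exact Or.inl h.symm

theorem pv_go (fuel : Nat) : ∀ (l cur : List Char) (acc : List (List Char)), l.length ≤ fuel →
    PySem.Chars.splitOn.go ['_'] fuel l cur acc =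
      acc.reverse ++ List.modifyHead (cur.reverse ++ ·) (List.splitOnP (· == '_') l) := by
  induction fuel with
  | zero =>
    intro l cur acc hl
    have : l = [] := List.eq_nil_of_length_eq_zero (Nat.le_zero.1 hl)
    subst this
    simp [PySem.Chars.splitOn.go, List.splitOnP_nil]
  | succ f ih =>
    intro l cur acc hl
    cases l with
    | nil => simp [PySem.Chars.splitOn.go, List.splitOnP_nil]
    | cons c rest =>
      by_cases hc : c = '_'
      · subst hc
        have : PySem.Chars.splitOn.go ['_'] (f+1) ('_' :: rest) cur acc =
            PySem.Chars.splitOn.go ['_'] f rest [] (cur.reverse :: acc) := by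
          simp [PySem.Chars.splitOn.go, List.isPrefixOf]
        rw [this, ih rest [] _ (by simpa using Nat.le_of_succ_le_succ hl)]
        rw [List.splitOnP_cons]
        simp only [beq_self_eq_true, if_true, List.modifyHead_cons, List.reverse_nil, List.nil_append, List.reverse_cons, List.append_assoc, List.singleton_append]
        cases List.splitOnP (· == '_') rest <;> simp
      · have : PySem.Chars.splitOn.go ['_'] (f+1) (c :: rest) cur acc =
            PySem.Chars.splitOn.go ['_'] f rest (c :: cur) acc := by
          simp [PySem.Chars.splitOn.go, List.isPrefixOf, Ne.symm hc]
        rw [this, ih rest (c :: cur) _ (by simpa using Nat.le_of_succ_le_succ hl)]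
        rw [List.splitOnP_cons]
        rcases List.exists_cons_of_ne_nil (List.splitOnP_ne_nil (· == '_') rest) with ⟨h0, t0, he⟩
        simp [he, hc]

theorem pv_split_bridge (k : List Char) :
    PySem.Chars.splitOn k ['_'] = List.splitOnP (· == '_') k := by
  unfold PySem.Chars.splitOn
  rw [pv_go (k.length + 1) k [] [] (Nat.le_succ _)]
  cases List.splitOnP (· == '_') k <;> simp

theorem pv_main (key : String) (ec : List Int) :
    should_exclude_key_py key ec = should_exclude_key_py_alt key ec := by
  unfold should_exclude_key_py should_exclude_key_py_alt
  rw [pv_split_bridge]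
  by_cases h2 : (List.splitOnP (· == '_') key.toList).length < 2
  · rw [if_pos h2]
    have hk : '_' ∉ key.toList := by
      intro hm
      rcases pv_firstSplit hm with ⟨a, r, he, ha⟩
      rw [he, List.splitOnP_first (· == '_') a
        (fun x hx => by simp only [beq_iff_eq]; rintro rfl; exact ha hx) '_' (by simp) r] at h2
      have hpos : 0 < (List.splitOnP (· == '_') r).length :=
        List.length_pos_of_ne_nil (List.splitOnP_ne_nil (· == '_') r)
      rw [List.length_cons] at h2
      omega
    split
    · rfl
    · rw [List.any_eq_false]
      intro idx _
      simp only [Bool.not_eq_true]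
      split_ifs with hb1 hb2 hb3
      · exact absurd (((PySem.Chars.startswith_iff _ _).1 hb1).subset (by simp)) hk
      · exact absurd (((PySem.Chars.isIn_iff_infix _ _).1 hb2).subset (by simp)) hk
      · exact absurd (((PySem.Chars.endswith_iff _ _).1 hb3).subset (by simp)) hk
      · rfl
  · rw [if_neg h2]
    have hu : '_' ∈ key.toList := by
      by_contra hk
      rw [List.splitOnP_eq_single _ _
        (fun x hx => by simp only [beq_iff_eq]; rintro rfl; exact hk hx)] at h2
      simp at h2
    have hpoint : ∀ idx : Int,
        (if PySem.Chars.startswith key.toList ((['c', 'h'] ++ PySem.Int.toChars idx) ++ ['_']) then true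
         else if PySem.Chars.isIn ('_' :: ((['c', 'h'] ++ PySem.Int.toChars idx) ++ ['_'])) key.toList then true
         else if PySem.Chars.endswith key.toList ('_' :: (['c', 'h'] ++ PySem.Int.toChars idx)) then true
         else false)
        = (PySem.Set.ofList (List.splitOnP (· == '_') key.toList)).contains (['c', 'h'] ++ PySem.Int.toChars idx) := by
      intro idx
      have ht := pv_underscore_not_mem_tag idx
      have hne : ¬(key.toList = ('c' :: 'h' :: PySem.Int.toChars idx)) := fun e => ht (e ▸ hu)
      have hml := pv_ML2 key.toList ('c' :: 'h' :: PySem.Int.toChars idx) ht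
      simp only [List.cons_append, List.nil_append] at hml ⊢
      simp only [Bool.if_true_left, Bool.if_false_right, Bool.and_true]
      rw [Bool.eq_iff_iff]
      simp only [Bool.or_eq_true, PySem.Chars.startswith_iff, PySem.Chars.isIn_iff_infix,
        PySem.Chars.endswith_iff, decide_eq_true_eq, PySem.Set.contains_eq_listContains,
        List.contains_eq_mem, PySem.Set.mem_ofList]
      rw [← hml]
      tauto
    cases ec with
    | nil => simp
    | cons i ec' =>
      rw [if_neg (by simp)]
      simp only [hpoint]

-- ===== VERDICT (by name: the statement is the Claim_ definition above) =====
theorem should_exclude_key_py_spec : Claim_equal_should_exclude_key_py := by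
  intro key ec _
  unfold Spec_should_exclude_key_py
  exact pv_main key ec
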